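-- pv_equiv track=rewrite | github.com/alxwen711/contestSubmissionArchive | codechef/starters 92/d.py | solve
-- ===== SOURCE A (Python) =====
-- def solve(n,k,ar):
--     total = sum(ar)+k # for computing total later
--     # first find how many of the lowest vals can be levelled
--     index = 0
--     for i in range(n-1):
--         diff = ar[i+1]-ar[i]
--         req = diff*(i+1)
--         if req > k: break
--         else:
--             k -= req
--             index += 1
--     # update first vals to match
--     for j in range(index):
--         ar[j] = ar[index]
--
--     # add last k
--     index += 1
--     inc = k//index #remaining increment
--     p1 = k % index #p1 val
--
--     for m in range(index):
--         ar[m] += inc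
--         if p1 > m: ar[m] += 1
--
--     ans = 0
--     for u in range(n):
--         ans = (ans+ar[u]*(total-ar[u])) % 1000000007
--     #500000004 is mod inv of 2
--     return (ans*500000004) % 1000000007
-- ===== SOURCE B (Python) =====
-- def solve(n, k, ar):
--     # No array modification: scan for the levelling cut (index, rem), then the
--     # levelled prefix's sum and sum of squares are closed-form arithmetic on
--     # (m, v, r); one pass over the untouched tail; pair sum via (S*T - Q)/2.
--     p = 1000000007
--     if n < 1:
--         return 0  # no elements considered, no pairs
--     S = sum(ar) + k
--     index, rem = 0, k
--     for i in range(1, n):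
--         req = (ar[i] - ar[i - 1]) * i
--         if req > rem:
--             break
--         index, rem = i, rem - req
--     m = index + 1
--     v = ar[index] + rem // m
--     r = rem % m
--     tail = ar[m:n]
--     T = m * v + r + sum(tail)
--     Q = m * v * v + (2 * v + 1) * r + sum(x * x for x in tail)
--     return (S * T - Q) % p * 500000004 % p
-- ===== Notes on version B (the rewrite author's own statement) =====
-- stated objective: alternative
-- what changed: B never builds the modified array: after the cut scan it replaces A's two in-place update loops and the final mod-accumulation loop over all n elements by O(1) closed-form arithmetic for the levelled prefix's sum and sum of squares plus a single pass over the untouched tail, returning (S*T - Q)*inv2 mod p; B does not mutate ar.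
import Mathlib
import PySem

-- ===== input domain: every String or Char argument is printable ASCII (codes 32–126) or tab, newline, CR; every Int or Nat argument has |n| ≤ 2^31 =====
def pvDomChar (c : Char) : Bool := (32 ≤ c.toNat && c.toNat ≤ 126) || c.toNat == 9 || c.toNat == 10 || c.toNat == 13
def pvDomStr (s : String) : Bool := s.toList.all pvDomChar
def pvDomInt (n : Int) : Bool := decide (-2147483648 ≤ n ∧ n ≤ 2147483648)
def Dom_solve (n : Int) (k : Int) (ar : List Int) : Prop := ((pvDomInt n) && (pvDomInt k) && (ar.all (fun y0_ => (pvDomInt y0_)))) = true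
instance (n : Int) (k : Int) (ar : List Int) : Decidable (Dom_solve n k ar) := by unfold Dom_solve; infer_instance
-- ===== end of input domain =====

-- B never builds the modified array: after the cut scan, the levelled prefix's
-- sum and sum of squares are closed-form arithmetic and only the untouched tail
-- is traversed; equivalence is about the RETURN value only (A mutates ar, B not).

-- ===== PORT A =====
-- 'for i in range(n-1): … if req > k: break' — loop with break as structural recursion over the range list
def solveLoop1 (ar : List Int) : List Int → Int × Int → Int × Int
  | [], st => st
  | i :: rest, (k, index) =>
    let diff := PySem.List.pyGetD ar (i + 1) 0 - PySem.List.pyGetD ar i 0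
    let req := diff * (i + 1)
    if req > k then (k, index)
    else solveLoop1 ar rest (k - req, index + 1)

def solve (n : Int) (k : Int) (ar : List Int) : Int :=
  let total := ar.sum + k
  let st := solveLoop1 ar (PySem.List.pyRange 0 (n - 1) 1) (k, 0)
  let k := st.1
  let index := st.2
  let ar := (PySem.List.pyRange 0 index 1).foldl
      (fun a j => PySem.List.pySetD a j (PySem.List.pyGetD a index 0)) ar
  let index := index + 1
  let inc := PySem.Int.floordiv k index
  let p1 := PySem.Int.mod k index
  let ar := (PySem.List.pyRange 0 index 1).foldl
      (fun a m =>
        let a := PySem.List.pySetD a m (PySem.List.pyGetD a m 0 + inc)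
        if p1 > m then PySem.List.pySetD a m (PySem.List.pyGetD a m 0 + 1) else a) ar
  let ans := (PySem.List.pyRange 0 n 1).foldl
      (fun ans u =>
        PySem.Int.mod (ans + PySem.List.pyGetD ar u 0 * (total - PySem.List.pyGetD ar u 0)) 1000000007) 0
  PySem.Int.mod (ans * 500000004) 1000000007

-- ===== PORT B =====
-- 'for i in range(1, n): … if req > rem: break' with state (index, rem)
def solveAltCut (ar : List Int) : List Int → Int × Int → Int × Int
  | [], st => st
  | i :: rest, (index, rem) =>
    let req := (PySem.List.pyGetD ar i 0 - PySem.List.pyGetD ar (i - 1) 0) * i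
    if req > rem then (index, rem)
    else solveAltCut ar rest (i, rem - req)

def solve_alt (n : Int) (k : Int) (ar : List Int) : Int :=
  let p : Int := 1000000007
  if n < 1 then 0 else
  let S := ar.sum + k
  let st := solveAltCut ar (PySem.List.pyRange 1 n 1) (0, k)
  let index := st.1
  let rem := st.2
  let m := index + 1
  let v := PySem.List.pyGetD ar index 0 + PySem.Int.floordiv rem m
  let r := PySem.Int.mod rem m
  let tail := PySem.List.slice ar (some m) (some n)
  let T := m * v + r + tail.sum
  let Q := m * v * v + (2 * v + 1) * r + (tail.map (fun x => x * x)).sum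
  PySem.Int.mod (PySem.Int.mod (S * T - Q) p * 500000004) p

-- ===== PRECONDITION & SPEC =====
-- Pre_ is exactly A's return domain: A raises (IndexError) iff ar = [] or
-- n > len ar.
def Pre_solve (n : Int) (k : Int) (ar : List Int) : Prop :=
  n ≤ (ar.length : Int) ∧ ar ≠ []
instance (n : Int) (k : Int) (ar : List Int) : Decidable (Pre_solve n k ar) := by
  unfold Pre_solve; infer_instance
def pvWitness_solve : Int × Int × List Int := (3, 7, [1, 2, 5])

def Spec_solve (n : Int) (k : Int) (ar : List Int) (out : Int) : Prop := out = solve_alt n k ar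
instance (n : Int) (k : Int) (ar : List Int) (out : Int) : Decidable (Spec_solve n k ar out) := by
  unfold Spec_solve; infer_instance

-- ===== CLAIM (what is proved, stated in full; the proofs are below) =====
def Claim_equal_solve : Prop := ∀ (n : Int) (k : Int) (ar : List Int),
  Dom_solve n k ar → Pre_solve n k ar → Spec_solve n k ar (solve n k ar)

-- ===== LEMMAS AND PROOFS =====
lemma solveLoop1_cons (ar : List Int) (i : Int) (rest : List Int) (k index : Int) :
    solveLoop1 ar (i :: rest) (k, index) =
      if (PySem.List.pyGetD ar (i + 1) 0 - PySem.List.pyGetD ar i 0) * (i + 1) > k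
      then (k, index)
      else solveLoop1 ar rest
        (k - (PySem.List.pyGetD ar (i + 1) 0 - PySem.List.pyGetD ar i 0) * (i + 1), index + 1) := rfl
lemma solveAltCut_cons (ar : List Int) (i : Int) (rest : List Int) (index rem : Int) :
    solveAltCut ar (i :: rest) (index, rem) =
      if (PySem.List.pyGetD ar i 0 - PySem.List.pyGetD ar (i - 1) 0) * i > rem
      then (index, rem)
      else solveAltCut ar rest (i, rem - (PySem.List.pyGetD ar i 0 - PySem.List.pyGetD ar (i - 1) 0) * i) := rfl

-- A's running-k levelling scan and B's cut scan walk the same steps: step i of A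
-- is step i+1 of B, with A's (k, index) being B's (rem, index) swapped.
lemma loops_agree (ar : List Int) (n : Int) :
    ∀ (d : Nat) (j : Nat) (k' : Int), (n - 1 - j).toNat = d →
    solveLoop1 ar (PySem.List.pyRange (j : Int) (n - 1) 1) (k', (j : Int))
      = ((solveAltCut ar (PySem.List.pyRange ((j : Int) + 1) n 1) (((j : Int), k') : Int × Int)).2,
         (solveAltCut ar (PySem.List.pyRange ((j : Int) + 1) n 1) (((j : Int), k') : Int × Int)).1) := by
  intro d
  induction d with
  | zero =>
    intro j k' hd
    rw [PySem.List.pyRange_one_eq_nil (by omega), PySem.List.pyRange_one_eq_nil (by omega)]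
    rfl
  | succ d ih =>
    intro j k' hd
    have hlt : (j : Int) < n - 1 := by omega
    rw [PySem.List.pyRange_one_cons hlt, PySem.List.pyRange_one_cons (show (j:Int)+1 < n by omega)]
    rw [solveLoop1_cons, solveAltCut_cons]
    rw [show (j : Int) + 1 - 1 = (j : Int) by ring]
    by_cases hbr : (PySem.List.pyGetD ar ((j : Int) + 1) 0 - PySem.List.pyGetD ar (j : Int) 0) * ((j : Int) + 1) > k'
    · rw [if_pos hbr, if_pos hbr]
    · rw [if_neg hbr, if_neg hbr]
      have := ih (j + 1) (k' - (PySem.List.pyGetD ar ((j : Int) + 1) 0 - PySem.List.pyGetD ar (j : Int) 0) * ((j : Int) + 1)) (by omega)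
      push_cast at this
      exact this

lemma solveLoop1_index_bounds (ar : List Int) :
    ∀ (l : List Int) (k i : Int),
      i ≤ (solveLoop1 ar l (k, i)).2 ∧ (solveLoop1 ar l (k, i)).2 ≤ i + l.length := by
  intro l
  induction l with
  | nil => intro k i; simp [solveLoop1]
  | cons x rest ih =>
    intro k i
    rw [solveLoop1_cons]
    split_ifs
    · simp; omega
    · have := ih (k - (PySem.List.pyGetD ar (x + 1) 0 - PySem.List.pyGetD ar x 0) * (x + 1)) (i + 1)
      simp only [List.length_cons]
      constructor
      · omega
      · push_cast; omega

-- A's second loop: ar[j] = ar[index] for j in range(index)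
lemma loop2_char (ar : List Int) (e : Nat) (he : e < ar.length) :
    ∀ (u : Nat), u ≤ e →
      (PySem.List.pyRange 0 (u : Int) 1).foldl
          (fun a j => PySem.List.pySetD a j (PySem.List.pyGetD a (e : Int) 0)) ar
        = List.replicate u (ar.getD e 0) ++ List.drop u ar := by
  intro u
  induction u with
  | zero => intro _; simp [PySem.List.pyRange_one_eq_nil]
  | succ u ih =>
    intro hu
    have hu' : u ≤ e := by omega
    have hue : u < ar.length := by omega
    rw [show ((u + 1 : Nat) : Int) = (u : Int) + 1 by push_cast; ring,
        PySem.List.pyRange_one_succ_right (by positivity), List.foldl_append, ih hu']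
    simp only [List.foldl_cons, List.foldl_nil]
    have hget : PySem.List.pyGetD (List.replicate u (ar.getD e 0) ++ List.drop u ar) (e : Int) 0
        = ar.getD e 0 := by
      rw [PySem.List.pyGetD_natCast,
        List.getD_append_right _ _ _ _ (by simpa using hu')]
      simp only [List.getD, List.getElem?_drop, List.length_replicate]
      rw [show u + (e - u) = e by omega]
    rw [hget, PySem.List.pySetD_natCast,
        List.set_append_right _ _ (by simp), List.drop_eq_getElem_cons hue]
    simp only [List.length_replicate, Nat.sub_self, List.set_cons_zero,
      List.replicate_succ', List.append_assoc, List.singleton_append]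

lemma set_bd (pre suf : List Int) (x v : Int) (u : Nat) (h : pre.length = u) :
    (pre ++ x :: suf).set u v = pre ++ v :: suf := by
  subst h
  rw [List.set_append_right _ _ (Nat.le_refl _)]
  simp

lemma getD_bd (pre suf : List Int) (x : Int) (u : Nat) (h : pre.length = u) :
    PySem.List.pyGetD (pre ++ x :: suf) (u : Int) 0 = x := by
  subst h
  rw [PySem.List.pyGetD_natCast, List.getD_append_right _ _ _ _ (Nat.le_refl _)]
  simp

-- A's third loop: ar[m] += inc; if p1 > m: ar[m] += 1, for m in range(index+1)
lemma loop3_char (c inc r : Int) (tail : List Int) (m' : Nat) :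
    ∀ (u : Nat), u ≤ m' →
      (PySem.List.pyRange 0 (u : Int) 1).foldl
          (fun a m =>
            if r > m then
              PySem.List.pySetD (PySem.List.pySetD a m (PySem.List.pyGetD a m 0 + inc)) m
                (PySem.List.pyGetD (PySem.List.pySetD a m (PySem.List.pyGetD a m 0 + inc)) m 0 + 1)
            else PySem.List.pySetD a m (PySem.List.pyGetD a m 0 + inc))
          (List.replicate m' c ++ tail)
        = (List.range u).map (fun (j : Nat) => if (j : Int) < r then c + inc + 1 else c + inc)
            ++ List.replicate (m' - u) c ++ tail := by
  intro u
  induction u with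
  | zero => intro _; simp [PySem.List.pyRange_one_eq_nil]
  | succ u ih =>
    intro hu
    have hu' : u ≤ m' := by omega
    have hrep : List.replicate (m' - u) c = c :: List.replicate (m' - (u + 1)) c := by
      rw [show m' - u = (m' - (u + 1)) + 1 by omega, List.replicate_succ]
    rw [show ((u + 1 : Nat) : Int) = (u : Int) + 1 by push_cast; ring, PySem.List.pyRange_one_succ_right (by positivity), List.foldl_append, ih hu',
        hrep, List.append_assoc, List.cons_append]
    simp only [List.foldl_cons, List.foldl_nil]
    have hlen : ((List.range u).map
        (fun (j : Nat) => if (j : Int) < r then c + inc + 1 else c + inc)).length = u := by simp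
    rw [getD_bd _ _ _ _ hlen]
    simp only [PySem.List.pySetD_natCast]
    rw [set_bd _ _ _ _ _ hlen, getD_bd _ _ _ _ hlen, set_bd _ _ _ _ _ hlen,
        List.range_succ, List.map_append]
    by_cases hbc : r > (u : Int)
    · rw [if_pos hbc]
      simp [hbc, List.append_assoc]
    · rw [if_neg hbc]
      have hnot : ¬ ((u : Int) < r) := hbc
      simp [hnot, List.append_assoc]

lemma mapf_replicate (a b r : Int) (hr : 0 ≤ r) :
    ∀ (mm : Nat), (List.range mm).map (fun (j : Nat) => if (j : Int) < r then a else b)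
      = List.replicate (min r.toNat mm) a ++ List.replicate (mm - r.toNat) b := by
  intro mm
  induction mm with
  | zero => simp
  | succ mm ih =>
    rw [List.range_succ, List.map_append, ih]
    simp only [List.map_cons, List.map_nil]
    by_cases h : (mm : Int) < r
    · have h1 : mm < r.toNat := by omega
      rw [if_pos h, show min r.toNat (mm + 1) = mm + 1 by omega,
          show min r.toNat mm = mm by omega, show mm - r.toNat = 0 by omega,
          show mm + 1 - r.toNat = 0 by omega]
      simp [List.replicate_succ']
    · have h1 : r.toNat ≤ mm := by omega
      rw [if_neg h, show min r.toNat (mm + 1) = r.toNat by omega,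
          show min r.toNat mm = r.toNat by omega,
          show mm + 1 - r.toNat = (mm - r.toNat) + 1 by omega]
      simp [List.replicate_succ', List.append_assoc]

lemma foldl_mod_add (S : Int) :
    ∀ (l : List Int) (a : Int),
      l.foldl (fun acc x => PySem.Int.mod (acc + x * (S - x)) 1000000007)
          (PySem.Int.mod a 1000000007)
        = PySem.Int.mod (a + (l.map (fun x => x * (S - x))).sum) 1000000007 := by
  intro l
  induction l with
  | nil => intro a; simp
  | cons x rest ih =>
    intro a
    simp only [List.foldl_cons, List.map_cons, List.sum_cons]
    have hp : (0 : Int) < 1000000007 := by norm_num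
    have h1 : PySem.Int.mod (PySem.Int.mod a 1000000007 + x * (S - x)) 1000000007
        = PySem.Int.mod (a + x * (S - x)) 1000000007 := by
      rw [PySem.Int.mod_eq_emod_of_pos hp, PySem.Int.mod_eq_emod_of_pos hp,
          PySem.Int.mod_eq_emod_of_pos hp]
      omega
    rw [h1, ih (a + x * (S - x))]
    congr 1
    ring

lemma sum_mul_split (S : Int) :
    ∀ (l : List Int), (l.map (fun x => x * (S - x))).sum
      = S * l.sum - (l.map (fun x => x * x)).sum := by
  intro l
  induction l with
  | nil => simp
  | cons x rest ih =>
    simp only [List.map_cons, List.sum_cons, ih]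
    ring

lemma sum_replicate_int (a : Nat) (x : Int) : (List.replicate a x).sum = (a : Int) * x := by
  simp [List.sum_replicate]

-- ===== VERDICT (by name: the statement is the Claim_ definition above) =====
theorem solve_spec : Claim_equal_solve := by
  unfold Claim_equal_solve
  intro n k ar _ hpre
  obtain ⟨hnlen, hne⟩ := hpre
  have hlen0 : 0 < ar.length := List.length_pos_of_ne_nil hne
  by_cases hn1 : n < 1
  · -- no element is considered: A's answer loop is empty, B's base case
    have h1 : PySem.List.pyRange 0 (n - 1) 1 = [] := PySem.List.pyRange_one_eq_nil (by omega)
    have h2 : PySem.List.pyRange 0 n 1 = [] := PySem.List.pyRange_one_eq_nil (by omega)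
    simp only [Spec_solve, solve, solve_alt, h1, h2, solveLoop1, List.foldl_nil, if_pos hn1]
    rw [PySem.Int.mod_eq_emod_of_pos (by norm_num)]
    norm_num
  simp only [Spec_solve, solve, solve_alt, if_neg hn1]
  -- the two scans agree, starting from j = 0
  have h00 := loops_agree ar n (n - 1 - (0:Nat)).toNat 0 k rfl
  simp only [Nat.cast_zero, zero_add] at h00
  have hbnd := solveLoop1_index_bounds ar (PySem.List.pyRange 0 (n - 1) 1) k 0
  rw [PySem.List.length_pyRange_one] at hbnd
  rw [h00] at hbnd ⊢
  generalize hB : solveAltCut ar (PySem.List.pyRange 1 n 1) ((0, k) : Int × Int) = stB at hbnd ⊢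
  obtain ⟨e, kf⟩ := stB
  simp only at hbnd ⊢
  clear hB h00
  have he0 : 0 ≤ e := hbnd.1
  have heN : e < (ar.length : Int) := by omega
  have hecast : e = ((e.toNat : Nat) : Int) := by omega
  rw [hecast]
  rw [loop2_char ar e.toNat (by omega) e.toNat le_rfl]
  have hL2 : List.replicate e.toNat (ar.getD e.toNat 0) ++ List.drop e.toNat ar
      = List.replicate (e.toNat + 1) (ar.getD e.toNat 0) ++ List.drop (e.toNat + 1) ar := by
    rw [List.replicate_succ', List.append_assoc, List.singleton_append,
        List.getD_eq_getElem ar 0 (show e.toNat < ar.length by omega),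
        ← List.drop_eq_getElem_cons (show e.toNat < ar.length by omega)]
  rw [hL2, show ((e.toNat : Int) + 1) = ((e.toNat + 1 : Nat) : Int) by push_cast; ring,
      loop3_char (ar.getD e.toNat 0) (PySem.Int.floordiv kf ((e.toNat + 1 : Nat) : Int))
        (PySem.Int.mod kf ((e.toNat + 1 : Nat) : Int)) (List.drop (e.toNat + 1) ar)
        (e.toNat + 1) (e.toNat + 1) le_rfl]
  simp only [Nat.sub_self, List.replicate_zero]
  have hm0 : (0 : Int) < ((e.toNat + 1 : Nat) : Int) := by positivity
  have hr0 : 0 ≤ PySem.Int.mod kf ((e.toNat + 1 : Nat) : Int) := PySem.Int.mod_nonneg _ hm0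
  have hrlt : PySem.Int.mod kf ((e.toNat + 1 : Nat) : Int) < ((e.toNat + 1 : Nat) : Int) :=
    PySem.Int.mod_lt _ hm0
  rw [mapf_replicate _ _ _ hr0 (e.toNat + 1),
      show min (PySem.Int.mod kf ((e.toNat + 1 : Nat) : Int)).toNat (e.toNat + 1)
        = (PySem.Int.mod kf ((e.toNat + 1 : Nat) : Int)).toNat by omega]
  simp only [List.append_nil]
  rw [PySem.List.pyGetD_natCast]
  set r2 := PySem.Int.mod kf ((e.toNat + 1 : Nat) : Int) with hr2
  set inc2 := PySem.Int.floordiv kf ((e.toNat + 1 : Nat) : Int) with hinc2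
  set c2 := ar.getD e.toNat 0 with hc2
  set M := List.replicate r2.toNat (c2 + inc2 + 1)
      ++ List.replicate (e.toNat + 1 - r2.toNat) (c2 + inc2)
      ++ List.drop (e.toNat + 1) ar with hMdef
  have hMlen : M.length = ar.length := by
    rw [hMdef]
    simp only [List.length_append, List.length_replicate, List.length_drop]
    omega
  -- A's answer loop over M, truncated at n
  have hcong : ∀ (acc : Int), ∀ u ∈ PySem.List.pyRange 0 n 1,
      PySem.Int.mod (acc + PySem.List.pyGetD M u 0 * (ar.sum + k - PySem.List.pyGetD M u 0))
          1000000007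
        = PySem.Int.mod (acc + PySem.List.pyGetD (M.take n.toNat) u 0
            * (ar.sum + k - PySem.List.pyGetD (M.take n.toNat) u 0)) 1000000007 := by
    intro acc u hu
    rw [PySem.List.mem_pyRange_one] at hu
    have htk : (M.take n.toNat).length = n.toNat := by
      rw [List.length_take]
      omega
    have h3 : PySem.List.pyGetD (M.take n.toNat) u 0 = PySem.List.pyGetD M u 0 := by
      rw [PySem.List.pyGetD_eq_getElem _ _ (by omega) (by rw [htk]; omega),
          PySem.List.pyGetD_eq_getElem _ _ (by omega) (by omega),
          List.getElem_take]
    rw [h3]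
  rw [PySem.List.foldl_congr_mem _ _ _ _ hcong]
  have hrange : PySem.List.pyRange 0 n 1 = PySem.List.pyRange 0 ((M.take n.toNat).length : Int) 1 := by
    congr 1
    rw [List.length_take]
    omega
  rw [hrange, PySem.List.foldl_pyRange_zero_pyGetD' (M.take n.toNat) 0
      (fun ans x => PySem.Int.mod (ans + x * (ar.sum + k - x)) 1000000007) 0]
  have h0p : PySem.Int.mod (0 : Int) 1000000007 = 0 := by
    rw [PySem.Int.mod_eq_emod_of_pos (by norm_num)]
    norm_num
  have hfold := foldl_mod_add (ar.sum + k) (M.take n.toNat) 0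
  rw [h0p, zero_add] at hfold
  rw [hfold, sum_mul_split]
  -- decompose the truncated modified array
  have hR : ((r2.toNat : Nat) : Int) = r2 := Int.toNat_of_nonneg hr0
  have hRle : r2.toNat ≤ e.toNat + 1 := by omega
  have htake : M.take n.toNat
      = List.replicate r2.toNat (c2 + inc2 + 1)
        ++ List.replicate (e.toNat + 1 - r2.toNat) (c2 + inc2)
        ++ (List.drop (e.toNat + 1) ar).take (n.toNat - (e.toNat + 1)) := by
    rw [hMdef, List.take_append, List.take_append,
        List.take_of_length_le (by simp; omega), List.take_of_length_le (by simp; omega)]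
    congr 2
    simp only [List.length_append, List.length_replicate]
    omega
  -- B's tail slice is that same tail segment
  have htail : PySem.List.slice ar (some (e + 1)) (some n)
      = (List.drop (e.toNat + 1) ar).take (n.toNat - (e.toNat + 1)) := by
    rw [PySem.List.slice_toNat _ (by omega) (by omega)]
    congr 2 <;> omega
  rw [htake]
  rw [show ((e.toNat + 1 : Nat) : Int) = e + 1 by omega] at hr2 hinc2 ⊢
  rw [htail]
  set t := (List.drop (e.toNat + 1) ar).take (n.toNat - (e.toNat + 1)) with ht
  -- sums of the decomposed head agree with B's closed forms
  have hsum : (List.replicate r2.toNat (c2 + inc2 + 1)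
        ++ List.replicate (e.toNat + 1 - r2.toNat) (c2 + inc2) ++ t).sum
      = (e + 1) * (c2 + inc2) + r2 + t.sum := by
    simp only [List.sum_append, sum_replicate_int]
    have : ((e.toNat + 1 - r2.toNat : Nat) : Int) = (e + 1) - r2 := by omega
    rw [this, hR]
    ring
  have hsq : ((List.replicate r2.toNat (c2 + inc2 + 1)
        ++ List.replicate (e.toNat + 1 - r2.toNat) (c2 + inc2) ++ t).map (fun x => x * x)).sum
      = (e + 1) * (c2 + inc2) * (c2 + inc2) + (2 * (c2 + inc2) + 1) * r2
        + (t.map (fun x => x * x)).sum := by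
    simp only [List.map_append, List.map_replicate, List.sum_append, sum_replicate_int]
    have : ((e.toNat + 1 - r2.toNat : Nat) : Int) = (e + 1) - r2 := by omega
    rw [this, hR]
    ring
  rw [hsum, hsq]
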